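-- pv_equiv track=rewrite | github.com/junaidaslam1/dag-task-generator | DeadlineMissVerification.py | getTaskFilePath
-- ===== SOURCE A (Python) =====
-- def getTaskFilePath(JobsFile):
-- 	lvFilePath = JobsFile.split('/')
-- 	lvFile = lvFilePath[len(lvFilePath) - 1].split('_')
--
-- 	TaskFilePath = ""
-- 	for element in range(0, len(lvFilePath) - 1):
-- 		TaskFilePath += lvFilePath[element] + '/'
--
-- 	length = len(lvFile)
-- 	TaskFile = ""
--
-- 	for n in range(0, length-1):
-- 		TaskFile += lvFile[n]
-- 		if n < length-2:
-- 			TaskFile += "_"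
-- 	TaskFile += ".csv"
--
-- 	TaskFilePath += TaskFile
-- 	return TaskFilePath
-- ===== SOURCE B (Python) =====
-- def getTaskFilePath(JobsFile):
-- 	dirpart, slash, fname = JobsFile.rpartition('/')
-- 	base, _sep, _rest = fname.rpartition('_')
-- 	return dirpart + slash + base + '.csv'
-- ===== Notes on version B (the rewrite author's own statement) =====
-- stated objective: idiomatic
-- what changed: Replaces the split-into-lists plus two index loops with two str.rpartition calls on the raw string (no intermediate lists, no loops).
import Mathlib
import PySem

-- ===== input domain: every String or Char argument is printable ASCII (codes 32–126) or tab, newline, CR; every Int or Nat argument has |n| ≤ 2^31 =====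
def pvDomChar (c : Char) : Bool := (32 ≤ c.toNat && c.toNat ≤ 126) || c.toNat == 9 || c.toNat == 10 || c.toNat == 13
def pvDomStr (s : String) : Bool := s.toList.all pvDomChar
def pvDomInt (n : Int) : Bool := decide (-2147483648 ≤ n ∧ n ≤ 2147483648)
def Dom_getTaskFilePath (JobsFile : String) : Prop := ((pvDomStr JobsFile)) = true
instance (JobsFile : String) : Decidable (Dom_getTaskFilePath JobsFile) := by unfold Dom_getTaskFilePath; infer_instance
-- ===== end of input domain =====

-- B replaces A's split-into-lists plus two index loops by two str.rpartition calls on the raw string (idiomatic, no loops).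

-- ===== PORT A =====
-- literal transliteration of A; strings handled as List Char via PySem.Chars, result rebuilt with String.ofList
def getTaskFilePath (JobsFile : String) : String :=
  let lvFilePath := PySem.Chars.splitOn JobsFile.toList ['/']
  -- lvFilePath[len(lvFilePath) - 1]: always in range (split is never empty), pyGetD is exact here
  let lvFile := PySem.Chars.splitOn (PySem.List.pyGetD lvFilePath ((lvFilePath.length : Int) - 1) []) ['_']
  let TaskFilePath := (PySem.List.pyRange 0 ((lvFilePath.length : Int) - 1) 1).foldl
      (fun acc element => acc ++ PySem.List.pyGetD lvFilePath element [] ++ ['/']) []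
  let length := lvFile.length
  let TaskFile := (PySem.List.pyRange 0 ((length : Int) - 1) 1).foldl
      (fun acc n => acc ++ PySem.List.pyGetD lvFile n [] ++ (if n < (length : Int) - 2 then ['_'] else [])) []
  let TaskFile := TaskFile ++ ('.' :: 'c' :: 's' :: 'v' :: [])
  String.ofList (TaskFilePath ++ TaskFile)

-- ===== PORT B =====
-- s.rpartition(sep) for a one-char sep, exact: ('', '', s) when sep is absent, else (s[:i], sep, s[i+1:]) at the last occurrence i
def pyRpartition (cs : List Char) (sep : Char) : List Char × List Char × List Char :=
  let i := PySem.Chars.rfind cs [sep]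
  if i = -1 then ([], [], cs)
  else (cs.take i.toNat, [sep], cs.drop (i.toNat + 1))

def getTaskFilePath_alt (JobsFile : String) : String :=
  let p := pyRpartition JobsFile.toList '/'
  let q := pyRpartition p.2.2 '_'
  String.ofList (p.1 ++ p.2.1 ++ q.1 ++ ('.' :: 'c' :: 's' :: 'v' :: []))

-- ===== PRECONDITION & SPEC =====
def Spec_getTaskFilePath (JobsFile : String) (out : String) : Prop := out = getTaskFilePath_alt JobsFile
instance (JobsFile : String) (out : String) : Decidable (Spec_getTaskFilePath JobsFile out) := by unfold Spec_getTaskFilePath; infer_instance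

-- ===== CLAIM (what is proved, stated in full; the proofs are below) =====
def Claim_equal_getTaskFilePath : Prop := ∀ (JobsFile : String), Dom_getTaskFilePath JobsFile → Spec_getTaskFilePath JobsFile (getTaskFilePath JobsFile)

-- ===== LEMMAS AND PROOFS =====

-- structural version of one-char splitOn, for the proofs
def sp (c : Char) : List Char → List (List Char)
  | [] => [[]]
  | x :: r => if x = c then [] :: sp c r else (sp c r).modifyHead (x :: ·)

theorem sp_ne_nil (c : Char) (l : List Char) : ∃ a t, sp c l = a :: t := by
  cases l with
  | nil => exact ⟨[], [], rfl⟩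
  | cons x r =>
    simp only [sp]
    split_ifs
    · exact ⟨[], sp c r, rfl⟩
    · obtain ⟨a, t, h⟩ := sp_ne_nil c r
      exact ⟨x :: a, t, by simp [h, List.modifyHead]⟩

theorem prefix_single (c : Char) (xs : List Char) :
    [c].isPrefixOf xs = true ↔ ∃ t, xs = c :: t := by
  cases xs with
  | nil => simp [List.isPrefixOf]
  | cons y t =>
    constructor
    · intro hp
      have hc : c = y := by simpa [List.isPrefixOf] using hp
      exact ⟨t, by rw [hc]⟩
    · rintro ⟨t', ht⟩
      injection ht with h1 h2
      subst h1; subst h2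
      simp [List.isPrefixOf]

theorem go_eq_sp (c : Char) (l : List Char) : ∀ (fuel : Nat) (cur : List Char)
    (acc : List (List Char)), l.length ≤ fuel →
    PySem.Chars.splitOn.go [c] fuel l cur acc
      = acc.reverse ++ (sp c l).modifyHead (cur.reverse ++ ·) := by
  induction l with
  | nil =>
    intro fuel cur acc _
    cases fuel <;> simp [PySem.Chars.splitOn.go, sp]
  | cons x r ih =>
    intro fuel cur acc h
    obtain ⟨f, rfl⟩ : ∃ f, fuel = f + 1 := ⟨fuel - 1, by simp at h; omega⟩
    simp only [List.length_cons] at h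
    by_cases hx : x = c
    · subst hx
      have hp : [x].isPrefixOf (x :: r) = true := (prefix_single x _).mpr ⟨r, rfl⟩
      simp only [PySem.Chars.splitOn.go, hp, if_true, List.length_cons, List.length_nil,
        Nat.zero_add, List.drop_succ_cons, List.drop_zero]
      rw [ih f [] (cur.reverse :: acc) (by omega)]
      obtain ⟨a, t, hat⟩ := sp_ne_nil x r
      simp [sp, hat, List.modifyHead]
    · have hp : [c].isPrefixOf (x :: r) = false := by
        rw [Bool.eq_false_iff]
        intro h'
        obtain ⟨t, ht⟩ := (prefix_single c _).mp h'
        exact hx (List.cons.inj ht).1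
      simp only [PySem.Chars.splitOn.go, hp, Bool.false_eq_true, if_false]
      rw [ih f (x :: cur) acc (by omega)]
      obtain ⟨a, t, hat⟩ := sp_ne_nil c r
      simp [sp, hx, hat, List.modifyHead]

theorem splitOn_eq_sp (c : Char) (l : List Char) :
    PySem.Chars.splitOn l [c] = sp c l := by
  rw [PySem.Chars.splitOn, go_eq_sp c l (l.length + 1) [] [] (by omega)]
  obtain ⟨a, t, hat⟩ := sp_ne_nil c l
  simp [hat, List.modifyHead]

theorem sp_no_sep (c : Char) (v : List Char) (h : c ∉ v) : sp c v = [v] := by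
  induction v with
  | nil => simp [sp]
  | cons x r ih =>
    simp only [List.mem_cons, not_or] at h
    have hx : ¬ x = c := fun he => h.1 he.symm
    simp [sp, hx, ih h.2, List.modifyHead]

theorem sp_append (c : Char) (u v : List Char) :
    sp c (u ++ c :: v) = sp c u ++ sp c v := by
  induction u with
  | nil => simp [sp]
  | cons x r ih =>
    by_cases hx : x = c
    · subst hx; simp [sp, ih]
    · obtain ⟨a', t', hat'⟩ := sp_ne_nil c r
      simp only [List.cons_append, sp, hx, if_false]
      rw [ih, hat']
      simp [List.modifyHead]

theorem spFold (c : Char) : ∀ (u p a : List Char),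
    ((sp c u).modifyHead (p ++ ·)).foldl (fun acc x => acc ++ x ++ [c]) a
      = a ++ p ++ u ++ [c] := by
  intro u
  induction u with
  | nil => intro p a; simp [sp, List.modifyHead]
  | cons x r ih =>
    intro p a
    by_cases hx : x = c
    · subst hx
      have h0 := ih [] (a ++ p ++ [x])
      obtain ⟨b, t, hbt⟩ := sp_ne_nil x r
      simp only [sp, List.modifyHead, hbt, List.foldl_cons] at h0 ⊢
      simpa using h0
    · obtain ⟨b, t, hbt⟩ := sp_ne_nil c r
      have h0 := ih (p ++ [x]) a
      simp only [sp, hx, if_false, List.modifyHead, hbt, List.foldl_cons] at h0 ⊢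
      simpa using h0

theorem sp_fold (c : Char) (u : List Char) :
    (sp c u).foldl (fun acc x => acc ++ x ++ [c]) [] = u ++ [c] := by
  have h := spFold c u [] []
  obtain ⟨b, t, hbt⟩ := sp_ne_nil c u
  simpa [hbt, List.modifyHead] using h

-- last-occurrence decomposition
theorem last_sep (c : Char) (l : List Char) (h : c ∈ l) :
    ∃ u v, l = u ++ c :: v ∧ c ∉ v := by
  induction l with
  | nil => simp at h
  | cons x r ih =>
    by_cases hr : c ∈ r
    · obtain ⟨u, v, rfl, hv⟩ := ih hr
      exact ⟨x :: u, v, rfl, hv⟩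
    · have hx : x = c := by
        rcases List.mem_cons.mp h with h' | h'
        · exact h'.symm
        · exact absurd h' hr
      exact ⟨[], r, by simp [hx], hr⟩

theorem rfind_go_none (c : Char) (l : List Char) (h : c ∉ l) :
    ∀ j, PySem.Chars.rfind.go l [c] j = -1 := by
  intro j
  induction j with
  | zero =>
    simp only [PySem.Chars.rfind.go]
    rw [if_neg]
    intro hp
    obtain ⟨t, ht⟩ := (prefix_single c l).mp hp
    exact h (ht ▸ List.mem_cons_self)
  | succ j ih =>
    simp only [PySem.Chars.rfind.go]
    rw [if_neg]
    · exact ih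
    · intro hp
      obtain ⟨t, ht⟩ := (prefix_single c _).mp hp
      exact h (List.mem_of_mem_drop (ht ▸ List.mem_cons_self))

theorem rfind_go_last (c : Char) (u v : List Char) (hv : c ∉ v) :
    ∀ j, u.length ≤ j → PySem.Chars.rfind.go (u ++ c :: v) [c] j = u.length := by
  intro j
  induction j with
  | zero =>
    intro hj
    have hu : u = [] := List.eq_nil_of_length_eq_zero (by omega)
    subst hu
    simp only [PySem.Chars.rfind.go, List.nil_append]
    rw [if_pos ((prefix_single c _).mpr ⟨v, rfl⟩)]
    simp
  | succ j ih =>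
    intro hj
    by_cases heq : u.length = j + 1
    · simp only [PySem.Chars.rfind.go]
      rw [if_pos]
      · simp [heq]
      · rw [← heq, List.drop_append, List.drop_length]
        simp only [Nat.sub_self, List.drop_zero, List.nil_append]
        exact (prefix_single c _).mpr ⟨v, rfl⟩
    · have hle : u.length ≤ j := by omega
      simp only [PySem.Chars.rfind.go]
      rw [if_neg]
      · exact ih hle
      · intro hp
        obtain ⟨t, ht⟩ := (prefix_single c _).mp hp
        rw [List.drop_append, List.drop_eq_nil_of_le (by omega), List.nil_append] at ht
        obtain ⟨m, hm⟩ : ∃ m, j + 1 - u.length = m + 1 := ⟨j - u.length, by omega⟩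
        rw [hm, List.drop_succ_cons] at ht
        exact hv (List.mem_of_mem_drop (ht ▸ List.mem_cons_self))

theorem rfind_none (c : Char) (l : List Char) (h : c ∉ l) :
    PySem.Chars.rfind l [c] = -1 := by
  rw [PySem.Chars.rfind]; exact rfind_go_none c l h _

theorem rfind_last (c : Char) (u v : List Char) (hv : c ∉ v) :
    PySem.Chars.rfind (u ++ c :: v) [c] = u.length := by
  rw [PySem.Chars.rfind]
  exact rfind_go_last c u v hv _ (by simp)

theorem pyGetD_concat_last {α : Type} (l : List α) (a : α) (d : α) :
    PySem.List.pyGetD (l ++ [a]) (((l ++ [a]).length : Int) - 1) d = a := by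
  rw [PySem.List.pyGetD_eq_getElem _ _ (by simp) (by simp)]
  simp

-- stage 1: A's directory loop = B's dirpart ++ slash
theorem stage1_dir (cs : List Char) :
    (PySem.List.pyRange 0 (((sp '/' cs).length : Int) - 1) 1).foldl
        (fun acc e => acc ++ PySem.List.pyGetD (sp '/' cs) e [] ++ ['/']) []
      = (if PySem.Chars.rfind cs ['/'] = -1 then ([] : List Char)
         else cs.take (PySem.Chars.rfind cs ['/']).toNat ++ ['/']) := by
  by_cases h : '/' ∈ cs
  · obtain ⟨u, v, rfl, hv⟩ := last_sep '/' cs h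
    rw [sp_append, sp_no_sep _ _ hv, rfind_last _ _ _ hv, if_neg (by omega)]
    have hb : (((sp '/' u ++ [v]).length : Int)) - 1 = ((sp '/' u).length : Int) := by
      simp
    rw [hb]
    calc (PySem.List.pyRange 0 ((sp '/' u).length : Int) 1).foldl
            (fun acc e => acc ++ PySem.List.pyGetD (sp '/' u ++ [v]) e [] ++ ['/']) []
        = (PySem.List.pyRange 0 ((sp '/' u).length : Int) 1).foldl
            (fun acc e => acc ++ PySem.List.pyGetD (sp '/' u) e [] ++ ['/']) [] := by
          apply PySem.List.foldl_congr_mem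
          intro acc x hx
          rw [PySem.List.mem_pyRange_one] at hx
          congr 1
          rw [PySem.List.pyGetD_eq_getElem _ _ hx.1 (by simp; omega),
              PySem.List.pyGetD_eq_getElem _ _ hx.1 hx.2]
          have hxlt : x.toNat < (sp '/' u).length := by omega
          exact congrArg (acc ++ ·) (List.getElem_append_left hxlt)
      _ = (sp '/' u).foldl (fun acc x => acc ++ x ++ ['/']) [] :=
          PySem.List.foldl_pyRange_zero_pyGetD' (sp '/' u) [] (fun acc x => acc ++ x ++ ['/']) []
      _ = u ++ ['/'] := sp_fold '/' u
      _ = (u ++ '/' :: v).take ((u.length : Int)).toNat ++ ['/'] := by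
          simp [List.take_left']
  · rw [sp_no_sep _ _ h, rfind_none _ _ h]
    simp [PySem.List.pyRange_one_eq_nil]

theorem stage1_last (cs : List Char) :
    PySem.List.pyGetD (sp '/' cs) (((sp '/' cs).length : Int) - 1) []
      = (if PySem.Chars.rfind cs ['/'] = -1 then cs
         else cs.drop ((PySem.Chars.rfind cs ['/']).toNat + 1)) := by
  by_cases h : '/' ∈ cs
  · obtain ⟨u, v, rfl, hv⟩ := last_sep '/' cs h
    rw [sp_append, sp_no_sep _ _ hv, rfind_last _ _ _ hv, if_neg (by omega)]
    rw [pyGetD_concat_last]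
    have h2 : ((u.length : Int)).toNat + 1 = (u ++ ['/']).length := by simp
    rw [h2, show u ++ '/' :: v = (u ++ ['/']) ++ v from by simp, List.drop_left]
  · rw [sp_no_sep _ _ h, rfind_none _ _ h]
    simp [PySem.List.pyGetD_eq_getElem]


-- stage 2: A's underscore loop = B's base
theorem stage2 (w : List Char) :
    (PySem.List.pyRange 0 (((sp '_' w).length : Int) - 1) 1).foldl
        (fun acc n => acc ++ PySem.List.pyGetD (sp '_' w) n []
            ++ (if n < ((sp '_' w).length : Int) - 2 then ['_'] else [])) []
      = (if PySem.Chars.rfind w ['_'] = -1 then ([] : List Char)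
         else w.take (PySem.Chars.rfind w ['_']).toNat) := by
  by_cases h : '_' ∈ w
  · obtain ⟨u, v, rfl, hv⟩ := last_sep '_' w h
    rw [sp_append, sp_no_sep _ _ hv, rfind_last _ _ _ hv, if_neg (by omega)]
    obtain ⟨t, a', hta⟩ : ∃ t a', sp '_' u = t ++ [a'] := by
      obtain ⟨b, s, hbs⟩ := sp_ne_nil '_' u
      exact ⟨(b :: s).dropLast, (b :: s).getLast (by simp), by
        rw [hbs]; exact (List.dropLast_concat_getLast (by simp)).symm⟩
    rw [hta]
    have hb : (((t ++ [a'] ++ [v]).length : Int)) - 1 = ((t.length : Int)) + 1 := by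
      simp; omega
    rw [hb, PySem.List.pyRange_one_succ_right (by omega), List.foldl_append]
    have hcond : ¬ ((t.length : Int) < (((t ++ [a'] ++ [v]).length : Int)) - 2) := by
      simp [List.length_append]
    have hget_t : PySem.List.pyGetD (t ++ [a'] ++ [v]) (t.length : Int) [] = a' := by
      rw [PySem.List.pyGetD_eq_getElem _ _ (by omega) (by simp)]
      have h4 : ((t.length : Int)).toNat < (t ++ [a']).length := by simp
      calc (t ++ [a'] ++ [v])[((t.length : Int)).toNat] 
          = (t ++ [a'])[((t.length : Int)).toNat] := List.getElem_append_left (bs := [v]) h4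
        _ = a' := by simp
    have hinit : (PySem.List.pyRange 0 (t.length : Int) 1).foldl
        (fun acc n => acc ++ PySem.List.pyGetD (t ++ [a'] ++ [v]) n []
            ++ (if n < (((t ++ [a'] ++ [v]).length : Int)) - 2 then ['_'] else [])) []
        = t.foldl (fun acc x => acc ++ x ++ ['_']) [] := by
      calc (PySem.List.pyRange 0 (t.length : Int) 1).foldl
              (fun acc n => acc ++ PySem.List.pyGetD (t ++ [a'] ++ [v]) n []
                  ++ (if n < (((t ++ [a'] ++ [v]).length : Int)) - 2 then ['_'] else [])) []
          = (PySem.List.pyRange 0 (t.length : Int) 1).foldl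
              (fun acc n => acc ++ PySem.List.pyGetD t n [] ++ ['_']) [] := by
            apply PySem.List.foldl_congr_mem
            intro acc x hx
            rw [PySem.List.mem_pyRange_one] at hx
            rw [if_pos (by simp; omega)]
            congr 2
            rw [PySem.List.pyGetD_eq_getElem _ _ hx.1 (by simp; omega),
                PySem.List.pyGetD_eq_getElem _ _ hx.1 hx.2]
            have h5 : x.toNat < (t ++ [a']).length := by simp; omega
            have h6 : x.toNat < t.length := by omega
            calc (t ++ [a'] ++ [v])[x.toNat]
                = (t ++ [a'])[x.toNat] := List.getElem_append_left (bs := [v]) h5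
              _ = t[x.toNat] := List.getElem_append_left (bs := [a']) h6
        _ = t.foldl (fun acc x => acc ++ x ++ ['_']) [] :=
            PySem.List.foldl_pyRange_zero_pyGetD' t [] (fun acc x => acc ++ x ++ ['_']) []
    rw [List.foldl_cons, List.foldl_nil, hinit, if_neg hcond, hget_t]
    have hq : (t ++ [a']).foldl (fun acc x => acc ++ x ++ ['_']) [] = u ++ ['_'] := by
      rw [← hta]; exact sp_fold '_' u
    rw [List.foldl_append, List.foldl_cons, List.foldl_nil] at hq
    have hu : t.foldl (fun acc x => acc ++ x ++ ['_']) [] ++ a' = u := by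
      have hdrop := congrArg List.dropLast hq
      simpa using hdrop
    rw [List.append_nil, hu]
    rw [show ((u.length : Int)).toNat = u.length from by simp, List.take_left']
    rfl
  · rw [sp_no_sep _ _ h, rfind_none _ _ h]
    simp [PySem.List.pyRange_one_eq_nil]

-- ===== VERDICT (by name: the statement is the Claim_ definition above) =====
theorem getTaskFilePath_spec : Claim_equal_getTaskFilePath := by
  intro JobsFile _
  unfold Spec_getTaskFilePath getTaskFilePath getTaskFilePath_alt pyRpartition
  simp only [splitOn_eq_sp]
  rw [stage1_dir, stage1_last]
  by_cases h : PySem.Chars.rfind JobsFile.toList ['/'] = -1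
  · simp only [h, if_true]
    rw [stage2]
    by_cases h2 : PySem.Chars.rfind JobsFile.toList ['_'] = -1 <;> simp [h2]
  · simp only [if_neg h]
    rw [stage2]
    by_cases h2 : PySem.Chars.rfind (JobsFile.toList.drop
        ((PySem.Chars.rfind JobsFile.toList ['/']).toNat + 1)) ['_'] = -1 <;>
      simp [h2]
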